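-- pv_equiv track=rewrite | github.com/jessicacohen554-cyber/hourly-cfe-optimizer | compute_eac_scarcity.py | walk_supply_stack
-- ===== SOURCE A (Python) =====
-- WHOLESALE_PRICES = {
--     "CAISO": 30, "ERCOT": 27, "PJM": 34, "NYISO": 42, "NEISO": 41
-- }
--
-- CLEAN_SUPPLY_STACK = {
--     "ERCOT": [
--         {"resource": "wind",       "lcoe": 40,  "annual_add_twh": 20, "max_cumulative_twh": 300},
--         {"resource": "solar",      "lcoe": 54,  "annual_add_twh": 25, "max_cumulative_twh": 400},
--         {"resource": "clean_firm", "lcoe": 90,  "annual_add_twh": 3,  "max_cumulative_twh": 50},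
--         {"resource": "storage",    "lcoe": 100, "annual_add_twh": 2,  "max_cumulative_twh": 30},
--     ],
--     "CAISO": [
--         {"resource": "solar",      "lcoe": 60,  "annual_add_twh": 10, "max_cumulative_twh": 150},
--         {"resource": "wind",       "lcoe": 73,  "annual_add_twh": 3,  "max_cumulative_twh": 50},
--         {"resource": "clean_firm", "lcoe": 90,  "annual_add_twh": 2,  "max_cumulative_twh": 30},
--         {"resource": "storage",    "lcoe": 100, "annual_add_twh": 2,  "max_cumulative_twh": 25},
--     ],
--     "PJM": [
--         {"resource": "wind",       "lcoe": 62,  "annual_add_twh": 8,  "max_cumulative_twh": 120},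
--         {"resource": "solar",      "lcoe": 65,  "annual_add_twh": 12, "max_cumulative_twh": 200},
--         {"resource": "clean_firm", "lcoe": 90,  "annual_add_twh": 3,  "max_cumulative_twh": 50},
--         {"resource": "storage",    "lcoe": 100, "annual_add_twh": 2,  "max_cumulative_twh": 30},
--     ],
--     "NYISO": [
--         {"resource": "wind",       "lcoe": 81,  "annual_add_twh": 3,  "max_cumulative_twh": 40},
--         {"resource": "clean_firm", "lcoe": 90,  "annual_add_twh": 1,  "max_cumulative_twh": 15},
--         {"resource": "solar",      "lcoe": 92,  "annual_add_twh": 2,  "max_cumulative_twh": 25},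
--         {"resource": "storage",    "lcoe": 100, "annual_add_twh": 1,  "max_cumulative_twh": 15},
--     ],
--     "NEISO": [
--         {"resource": "wind",       "lcoe": 73,  "annual_add_twh": 3,  "max_cumulative_twh": 40},
--         {"resource": "solar",      "lcoe": 82,  "annual_add_twh": 2,  "max_cumulative_twh": 30},
--         {"resource": "clean_firm", "lcoe": 90,  "annual_add_twh": 1,  "max_cumulative_twh": 15},
--         {"resource": "storage",    "lcoe": 100, "annual_add_twh": 1,  "max_cumulative_twh": 15},
--     ],
-- }
--
-- def walk_supply_stack(iso, year, total_new_demand_twh):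
--     """Walk up the supply stack with combined demand, return marginal LCOE.
--
--     Both RPS-mandated build and voluntary corporate demand compete for the
--     same finite buildable capacity. The marginal cost is set by where
--     combined demand lands on the stack.
--     """
--     wholesale = WHOLESALE_PRICES[iso]
--     years_elapsed = max(1, year - 2025)
--
--     if total_new_demand_twh <= 0:
--         return wholesale  # No new demand — marginal cost = wholesale
--
--     remaining = total_new_demand_twh
--     marginal_lcoe = wholesale
--     stack = CLEAN_SUPPLY_STACK[iso]
--
--     for tier in stack:
--         tier_capacity = min(tier["annual_add_twh"] * years_elapsed, tier["max_cumulative_twh"])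
--         if tier_capacity <= 0:
--             continue
--         if remaining <= tier_capacity:
--             marginal_lcoe = tier["lcoe"]
--             remaining = 0
--             break
--         remaining -= tier_capacity
--         marginal_lcoe = tier["lcoe"]
--
--     # If demand exceeds all tiers — scarcity pricing
--     if remaining > 0:
--         scarcity_surcharge = remaining * 3  # $3/MWh per TWh of shortage
--         marginal_lcoe = marginal_lcoe + scarcity_surcharge
--
--     return marginal_lcoe
-- ===== SOURCE B (Python) =====
-- WHOLESALE_PRICES = {
--     "CAISO": 30, "ERCOT": 27, "PJM": 34, "NYISO": 42, "NEISO": 41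
-- }
--
-- CLEAN_SUPPLY_STACK = {
--     "ERCOT": [
--         {"resource": "wind",       "lcoe": 40,  "annual_add_twh": 20, "max_cumulative_twh": 300},
--         {"resource": "solar",      "lcoe": 54,  "annual_add_twh": 25, "max_cumulative_twh": 400},
--         {"resource": "clean_firm", "lcoe": 90,  "annual_add_twh": 3,  "max_cumulative_twh": 50},
--         {"resource": "storage",    "lcoe": 100, "annual_add_twh": 2,  "max_cumulative_twh": 30},
--     ],
--     "CAISO": [
--         {"resource": "solar",      "lcoe": 60,  "annual_add_twh": 10, "max_cumulative_twh": 150},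
--         {"resource": "wind",       "lcoe": 73,  "annual_add_twh": 3,  "max_cumulative_twh": 50},
--         {"resource": "clean_firm", "lcoe": 90,  "annual_add_twh": 2,  "max_cumulative_twh": 30},
--         {"resource": "storage",    "lcoe": 100, "annual_add_twh": 2,  "max_cumulative_twh": 25},
--     ],
--     "PJM": [
--         {"resource": "wind",       "lcoe": 62,  "annual_add_twh": 8,  "max_cumulative_twh": 120},
--         {"resource": "solar",      "lcoe": 65,  "annual_add_twh": 12, "max_cumulative_twh": 200},
--         {"resource": "clean_firm", "lcoe": 90,  "annual_add_twh": 3,  "max_cumulative_twh": 50},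
--         {"resource": "storage",    "lcoe": 100, "annual_add_twh": 2,  "max_cumulative_twh": 30},
--     ],
--     "NYISO": [
--         {"resource": "wind",       "lcoe": 81,  "annual_add_twh": 3,  "max_cumulative_twh": 40},
--         {"resource": "clean_firm", "lcoe": 90,  "annual_add_twh": 1,  "max_cumulative_twh": 15},
--         {"resource": "solar",      "lcoe": 92,  "annual_add_twh": 2,  "max_cumulative_twh": 25},
--         {"resource": "storage",    "lcoe": 100, "annual_add_twh": 1,  "max_cumulative_twh": 15},
--     ],
--     "NEISO": [
--         {"resource": "wind",       "lcoe": 73,  "annual_add_twh": 3,  "max_cumulative_twh": 40},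
--         {"resource": "solar",      "lcoe": 82,  "annual_add_twh": 2,  "max_cumulative_twh": 30},
--         {"resource": "clean_firm", "lcoe": 90,  "annual_add_twh": 1,  "max_cumulative_twh": 15},
--         {"resource": "storage",    "lcoe": 100, "annual_add_twh": 1,  "max_cumulative_twh": 15},
--     ],
-- }
--
-- def walk_supply_stack(iso, year, total_new_demand_twh):
--     """Marginal LCOE via effective capacities + cumulative sums instead of a
--     stateful walk: the marginal tier is the first whose cumulative effective
--     capacity covers the demand; beyond the whole stack, scarcity pricing on
--     the last tier's LCOE."""
--     wholesale = WHOLESALE_PRICES[iso]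
--     years_elapsed = max(1, year - 2025)
--     if total_new_demand_twh <= 0:
--         return wholesale
--     stack = CLEAN_SUPPLY_STACK[iso]
--     caps = [min(t["annual_add_twh"] * years_elapsed, t["max_cumulative_twh"]) for t in stack]
--     cums = []
--     total = 0
--     for c in caps:
--         total += c
--         cums.append(total)
--     marginal = next((t["lcoe"] for t, c in zip(stack, cums) if c >= total_new_demand_twh), None)
--     if marginal is not None:
--         return marginal
--     return stack[-1]["lcoe"] + (total_new_demand_twh - total) * 3
-- ===== Notes on version B (the rewrite author's own statement) =====
-- stated objective: alternative
-- what changed: Replaces A's stateful walk (mutating remaining/marginal_lcoe with break/continue) by a data-flow decomposition: effective capacities, cumulative sums, first tier whose cumulative sum covers demand, scarcity surcharge on the last tier's LCOE using the precomputed total; Pre_ excludes unknown ISO keys, on which both programs raise KeyError.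
import Mathlib
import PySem

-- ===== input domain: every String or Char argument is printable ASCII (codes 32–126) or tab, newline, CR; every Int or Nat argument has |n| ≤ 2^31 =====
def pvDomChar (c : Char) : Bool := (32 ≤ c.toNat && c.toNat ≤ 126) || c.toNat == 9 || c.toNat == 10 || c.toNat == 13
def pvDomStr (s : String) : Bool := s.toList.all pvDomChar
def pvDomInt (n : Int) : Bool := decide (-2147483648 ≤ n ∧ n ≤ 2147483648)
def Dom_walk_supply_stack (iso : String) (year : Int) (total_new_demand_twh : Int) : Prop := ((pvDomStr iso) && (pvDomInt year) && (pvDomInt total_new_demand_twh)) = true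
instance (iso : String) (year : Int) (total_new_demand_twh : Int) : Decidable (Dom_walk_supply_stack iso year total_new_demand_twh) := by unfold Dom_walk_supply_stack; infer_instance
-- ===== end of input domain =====

-- B recomputes the marginal LCOE from effective capacities and cumulative sums
-- (first tier whose cumsum covers demand; scarcity surcharge on the last tier)
-- instead of A's stateful walk with remaining/break/continue: an alternative
-- decomposition of the same O(k) task, proved equal on the five known ISOs.


-- Shared module constants (dicts as association lists; a tier is (lcoe, annual_add_twh, max_cumulative_twh))
def WHOLESALE_PRICES : PySem.Dict String Int :=
  PySem.Dict.mk [("CAISO", 30), ("ERCOT", 27), ("PJM", 34), ("NYISO", 42), ("NEISO", 41)]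

def CLEAN_SUPPLY_STACK : PySem.Dict String (List (Int × Int × Int)) :=
  PySem.Dict.mk [ ("ERCOT", [(40, 20, 300), (54, 25, 400), (90, 3, 50), (100, 2, 30)]),
    ("CAISO", [(60, 10, 150), (73, 3, 50), (90, 2, 30), (100, 2, 25)]),
    ("PJM",   [(62, 8, 120), (65, 12, 200), (90, 3, 50), (100, 2, 30)]),
    ("NYISO", [(81, 3, 40), (90, 1, 15), (92, 2, 25), (100, 1, 15)]),
    ("NEISO", [(73, 3, 40), (82, 2, 30), (90, 1, 15), (100, 1, 15)]) ]

-- ===== PORT A =====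
-- A's for-loop: state (remaining, marginal_lcoe); `continue` for cap ≤ 0, `break` when remaining ≤ cap
def walkLoopA : List (Int × Int × Int) → Int → Int → Int → Int × Int
  | [], _, remaining, marginal => (remaining, marginal)
  | (lcoe, add, mc) :: rest, ye, remaining, marginal =>
      let cap := min (add * ye) mc
      if cap ≤ 0 then walkLoopA rest ye remaining marginal
      else if remaining ≤ cap then (0, lcoe)
      else walkLoopA rest ye (remaining - cap) lcoe

def walk_supply_stack (iso : String) (year : Int) (total_new_demand_twh : Int) : Int :=
  -- WHOLESALE_PRICES[iso] / CLEAN_SUPPLY_STACK[iso] raise KeyError on unknown iso; Pre_ excludes that,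
  -- so the .getD defaults are unreachable on claimed inputs
  let wholesale := (PySem.Dict.get? WHOLESALE_PRICES iso).getD 0
  let years_elapsed := max 1 (year - 2025)
  if total_new_demand_twh ≤ 0 then wholesale
  else
    let stack := (PySem.Dict.get? CLEAN_SUPPLY_STACK iso).getD []
    let rm := walkLoopA stack years_elapsed total_new_demand_twh wholesale
    if rm.1 > 0 then rm.2 + rm.1 * 3 else rm.2

-- ===== PORT B =====
-- B's cums-building loop: returns (cums, total)
def buildCums : List Int → Int → List Int × Int
  | [], total => ([], total)
  | c :: rest, total =>
      let t := total + c
      let r := buildCums rest t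
      (t :: r.1, r.2)

-- B's `next((t["lcoe"] for t, c in zip(stack, cums) if c >= d), None)`
def findMarginal : List ((Int × Int × Int) × Int) → Int → Option Int
  | [], _ => none
  | (t, c) :: rest, d => if c ≥ d then some t.1 else findMarginal rest d

def walk_supply_stack_alt (iso : String) (year : Int) (total_new_demand_twh : Int) : Int :=
  let wholesale := (PySem.Dict.get? WHOLESALE_PRICES iso).getD 0
  let years_elapsed := max 1 (year - 2025)
  if total_new_demand_twh ≤ 0 then wholesale
  else
    let stack := (PySem.Dict.get? CLEAN_SUPPLY_STACK iso).getD []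
    let caps := stack.map (fun t => min (t.2.1 * years_elapsed) t.2.2)
    let ct := buildCums caps 0
    match findMarginal (stack.zip ct.1) total_new_demand_twh with
    | some l => l
    | none => ((PySem.List.pyGet? stack (-1)).map (·.1)).getD 0 + (total_new_demand_twh - ct.2) * 3

-- ===== PRECONDITION & SPEC =====
-- Pre_ excludes exactly the ISO keys absent from the module dicts, on which A (and B) raise KeyError.
def Pre_walk_supply_stack (iso : String) (year : Int) (total_new_demand_twh : Int) : Prop :=
  iso = "CAISO" ∨ iso = "ERCOT" ∨ iso = "PJM" ∨ iso = "NYISO" ∨ iso = "NEISO"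
instance (iso : String) (year : Int) (total_new_demand_twh : Int) : Decidable (Pre_walk_supply_stack iso year total_new_demand_twh) := by unfold Pre_walk_supply_stack; infer_instance

def pvWitness_walk_supply_stack : String × Int × Int := ("ERCOT", 2030, 100)

def Spec_walk_supply_stack (iso : String) (year : Int) (total_new_demand_twh : Int) (out : Int) : Prop := out = walk_supply_stack_alt iso year total_new_demand_twh
instance (iso : String) (year : Int) (total_new_demand_twh : Int) (out : Int) : Decidable (Spec_walk_supply_stack iso year total_new_demand_twh out) := by unfold Spec_walk_supply_stack; infer_instance

-- ===== CLAIM (what is proved, stated in full; the proofs are below) =====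
def Claim_equal_walk_supply_stack : Prop := ∀ (iso : String) (year : Int) (total_new_demand_twh : Int), Dom_walk_supply_stack iso year total_new_demand_twh → Pre_walk_supply_stack iso year total_new_demand_twh → Spec_walk_supply_stack iso year total_new_demand_twh (walk_supply_stack iso year total_new_demand_twh)

-- ===== LEMMAS AND PROOFS =====
-- Core invariant: A's stateful walk with remaining = d - a equals B's
-- cumulative-sum search started at accumulator a, for positive remaining
-- demand and positive effective capacities.
theorem walk_eq (ye : Int) (stack : List (Int × Int × Int)) : ∀ (a d w : Int), 0 < d - a →
    (∀ t ∈ stack, 0 < min (t.2.1 * ye) t.2.2) →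
    (if 0 < (walkLoopA stack ye (d - a) w).1
      then (walkLoopA stack ye (d - a) w).2 + (walkLoopA stack ye (d - a) w).1 * 3
      else (walkLoopA stack ye (d - a) w).2)
    = (match findMarginal (stack.zip (buildCums (stack.map (fun t => min (t.2.1 * ye) t.2.2)) a).1) d with
       | some l => l
       | none => ((PySem.List.pyGet? stack (-1)).map (·.1)).getD w
                 + (d - (buildCums (stack.map (fun t => min (t.2.1 * ye) t.2.2)) a).2) * 3) := by
  induction stack with
  | nil =>
    intro a d w hd _
    simp [walkLoopA, buildCums, findMarginal, PySem.List.pyGet?_neg_one]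
    omega
  | cons x rest ih =>
    intro a d w hd hpos
    obtain ⟨lcoe, add, mc⟩ := x
    have hcap : 0 < min (add * ye) mc := hpos (lcoe, add, mc) (by simp)
    have hpos' : ∀ t ∈ rest, 0 < min (t.2.1 * ye) t.2.2 := fun t ht => hpos t (by simp [ht])
    by_cases hle : d - a ≤ min (add * ye) mc
    · have hge : a + min (add * ye) mc ≥ d := by omega
      simp [walkLoopA, buildCums, findMarginal, hcap.not_ge, hle, hge]
    · have hge : ¬ a + min (add * ye) mc ≥ d := by omega
      have hd' : 0 < d - (a + min (add * ye) mc) := by omega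
      have h := ih (a + min (add * ye) mc) d lcoe hd' hpos'
      cases rest with
      | nil =>
        simp [walkLoopA, buildCums, findMarginal, hcap.not_ge, hle, hge,
          PySem.List.pyGet?_neg_one, sub_sub]
      | cons y t =>
        obtain ⟨z, hz⟩ := Option.isSome_iff_exists.mp
          ((List.getLast?_isSome (l := y :: t)).mpr (by simp))
        simp [walkLoopA, buildCums, findMarginal, hcap.not_ge, hle, hge,
          PySem.List.pyGet?_neg_one, hz, sub_sub] at h ⊢
        exact h

theorem per_CAISO (year total_new_demand_twh : Int) :
    walk_supply_stack "CAISO" year total_new_demand_twh = walk_supply_stack_alt "CAISO" year total_new_demand_twh := by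
  by_cases hd : total_new_demand_twh ≤ 0 <;>
    simp [walk_supply_stack, walk_supply_stack_alt, WHOLESALE_PRICES, CLEAN_SUPPLY_STACK,
      PySem.Dict.get?_mk_cons, hd]
  have h0 := walk_eq (max 1 (year - 2025)) [((60:Int), (10:Int), (150:Int)), (73, 3, 50), (90, 2, 30), (100, 2, 25)] 0 total_new_demand_twh 30
      (by omega) (by intro t ht; fin_cases ht <;> dsimp only <;> omega)
  simp only [sub_zero] at h0
  simpa using h0

theorem per_ERCOT (year total_new_demand_twh : Int) :
    walk_supply_stack "ERCOT" year total_new_demand_twh = walk_supply_stack_alt "ERCOT" year total_new_demand_twh := by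
  by_cases hd : total_new_demand_twh ≤ 0 <;>
    simp [walk_supply_stack, walk_supply_stack_alt, WHOLESALE_PRICES, CLEAN_SUPPLY_STACK,
      PySem.Dict.get?_mk_cons, hd]
  have h0 := walk_eq (max 1 (year - 2025)) [((40:Int), (20:Int), (300:Int)), (54, 25, 400), (90, 3, 50), (100, 2, 30)] 0 total_new_demand_twh 27
      (by omega) (by intro t ht; fin_cases ht <;> dsimp only <;> omega)
  simp only [sub_zero] at h0
  simpa using h0

theorem per_PJM (year total_new_demand_twh : Int) :
    walk_supply_stack "PJM" year total_new_demand_twh = walk_supply_stack_alt "PJM" year total_new_demand_twh := by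
  by_cases hd : total_new_demand_twh ≤ 0 <;>
    simp [walk_supply_stack, walk_supply_stack_alt, WHOLESALE_PRICES, CLEAN_SUPPLY_STACK,
      PySem.Dict.get?_mk_cons, hd]
  have h0 := walk_eq (max 1 (year - 2025)) [((62:Int), (8:Int), (120:Int)), (65, 12, 200), (90, 3, 50), (100, 2, 30)] 0 total_new_demand_twh 34
      (by omega) (by intro t ht; fin_cases ht <;> dsimp only <;> omega)
  simp only [sub_zero] at h0
  simpa using h0

theorem per_NYISO (year total_new_demand_twh : Int) :
    walk_supply_stack "NYISO" year total_new_demand_twh = walk_supply_stack_alt "NYISO" year total_new_demand_twh := by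
  by_cases hd : total_new_demand_twh ≤ 0 <;>
    simp [walk_supply_stack, walk_supply_stack_alt, WHOLESALE_PRICES, CLEAN_SUPPLY_STACK,
      PySem.Dict.get?_mk_cons, hd]
  have h0 := walk_eq (max 1 (year - 2025)) [((81:Int), (3:Int), (40:Int)), (90, 1, 15), (92, 2, 25), (100, 1, 15)] 0 total_new_demand_twh 42
      (by omega) (by intro t ht; fin_cases ht <;> dsimp only <;> omega)
  simp only [sub_zero] at h0
  simpa using h0

theorem per_NEISO (year total_new_demand_twh : Int) :
    walk_supply_stack "NEISO" year total_new_demand_twh = walk_supply_stack_alt "NEISO" year total_new_demand_twh := by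
  by_cases hd : total_new_demand_twh ≤ 0 <;>
    simp [walk_supply_stack, walk_supply_stack_alt, WHOLESALE_PRICES, CLEAN_SUPPLY_STACK,
      PySem.Dict.get?_mk_cons, hd]
  have h0 := walk_eq (max 1 (year - 2025)) [((73:Int), (3:Int), (40:Int)), (82, 2, 30), (90, 1, 15), (100, 1, 15)] 0 total_new_demand_twh 41
      (by omega) (by intro t ht; fin_cases ht <;> dsimp only <;> omega)
  simp only [sub_zero] at h0
  simpa using h0

theorem per_iso (iso : String) (year total_new_demand_twh : Int)
    (h : iso = "CAISO" ∨ iso = "ERCOT" ∨ iso = "PJM" ∨ iso = "NYISO" ∨ iso = "NEISO") :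
    walk_supply_stack iso year total_new_demand_twh = walk_supply_stack_alt iso year total_new_demand_twh := by
  rcases h with h | h | h | h | h <;> subst h
  · exact per_CAISO year total_new_demand_twh
  · exact per_ERCOT year total_new_demand_twh
  · exact per_PJM year total_new_demand_twh
  · exact per_NYISO year total_new_demand_twh
  · exact per_NEISO year total_new_demand_twh

-- ===== VERDICT (by name: the statement is the Claim_ definition above) =====
theorem walk_supply_stack_spec : Claim_equal_walk_supply_stack := by
  intro iso year d _ hpre
  exact per_iso iso year d hpre
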